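-- pv_equiv track=rewrite | github.com/nastyh/LeetCode | Basic Data Structures/1196_how_many_apples_can_you_put_into_the_basket.py | maxNumberOfApples
-- ===== SOURCE A (Python) =====
-- from typing import List
--
-- def maxNumberOfApples(weight: List[int]) -> int:  # O(n(logn)) and O(1)
--     # greedy approach
--     # sort first since we want to fit as many as possible
--     sorted_weight = sorted(weight)
--     max_w = 5000
--     res, curr_w = 0, 0
--     for w in sorted_weight:
--         if curr_w + w <= max_w: # this is the trick
--             # otherwise we won't catch when it's 4150 but then we add 1000 and go over
--             curr_w += w
--             res += 1
--     return res
-- ===== SOURCE B (Python) =====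
-- def maxNumberOfApples(weight):
--     # prefix sums of the sorted weights, then count how many stay within 5000
--     prefix = []
--     total = 0
--     for w in sorted(weight):
--         total += w
--         prefix.append(total)
--     return sum(1 for s in prefix if s <= 5000)
-- ===== Notes on version B (the rewrite author's own statement) =====
-- stated objective: alternative
-- what changed: Replaces the stateful greedy (conditionally accumulating and counting in one loop) by an unconditional prefix-sum pass over the sorted list followed by counting prefix sums <= 5000; this relies on the proved fact that on a sorted list the greedy's accepted items form exactly the prefixes whose sum is <= 5000.
import Mathlib
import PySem

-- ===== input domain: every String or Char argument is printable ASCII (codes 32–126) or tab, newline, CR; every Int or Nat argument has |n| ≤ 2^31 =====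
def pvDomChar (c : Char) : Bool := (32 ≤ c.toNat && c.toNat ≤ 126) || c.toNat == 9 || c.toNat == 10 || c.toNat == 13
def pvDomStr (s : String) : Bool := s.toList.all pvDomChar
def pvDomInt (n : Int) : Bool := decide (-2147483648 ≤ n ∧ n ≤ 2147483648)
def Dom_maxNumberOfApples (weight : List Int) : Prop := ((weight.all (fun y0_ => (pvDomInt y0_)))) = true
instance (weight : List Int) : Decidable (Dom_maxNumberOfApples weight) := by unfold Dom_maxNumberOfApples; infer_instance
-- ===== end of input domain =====

-- B replaces A's stateful greedy loop by prefix sums of the sorted list plus a count of those ≤ 5000 (alternative decomposition, same cost).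

-- ===== PORT A =====
def maxNumberOfApples (weight : List Int) : Int :=
  let sorted_weight := PySem.List.sorted weight (fun x => x) false
  let max_w : Int := 5000
  let p := sorted_weight.foldl
    (fun (s : Int × Int) w => if s.2 + w ≤ max_w then (s.1 + 1, s.2 + w) else s)
    ((0 : Int), (0 : Int))
  p.1

-- ===== PORT B =====
def maxNumberOfApples_alt (weight : List Int) : Int :=
  let p := (PySem.List.sorted weight (fun x => x) false).foldl
    (fun (s : Int × List Int) w => (s.1 + w, s.2 ++ [s.1 + w]))
    ((0 : Int), ([] : List Int))
  p.2.foldl (fun acc s => if s ≤ 5000 then acc + 1 else acc) 0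

-- ===== PRECONDITION & SPEC =====
def Spec_maxNumberOfApples (weight : List Int) (out : Int) : Prop := out = maxNumberOfApples_alt weight
instance (weight : List Int) (out : Int) : Decidable (Spec_maxNumberOfApples weight out) := by unfold Spec_maxNumberOfApples; infer_instance

-- ===== CLAIM (what is proved, stated in full; the proofs are below) =====
def Claim_equal_maxNumberOfApples : Prop := ∀ (weight : List Int), Dom_maxNumberOfApples weight → Spec_maxNumberOfApples weight (maxNumberOfApples weight)

-- ===== LEMMAS AND PROOFS =====

/-- prefix sums of `l` starting from accumulated value `c` -/
def psums : List Int → Int → List Int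
  | [], _ => []
  | w :: t, c => (c + w) :: psums t (c + w)

/-- number of entries ≤ 5000 -/
def cntLE : List Int → Int
  | [] => 0
  | s :: t => (if s ≤ 5000 then 1 else 0) + cntLE t

theorem countFold (l : List Int) (acc : Int) :
    l.foldl (fun a s => if s ≤ 5000 then a + 1 else a) acc = acc + cntLE l := by
  induction l generalizing acc with
  | nil => simp [cntLE]
  | cons s t ih => simp only [List.foldl, cntLE]; rw [ih]; split_ifs <;> ring

theorem buildB (l : List Int) (t : Int) (acc : List Int) :
    l.foldl (fun (s : Int × List Int) w => (s.1 + w, s.2 ++ [s.1 + w])) (t, acc)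
      = (t + l.sum, acc ++ psums l t) := by
  induction l generalizing t acc with
  | nil => simp [psums]
  | cons w r ih => simp [List.foldl, psums, ih]; ring

theorem reject (l : List Int) (c res : Int)
    (h : ∀ x ∈ l, 0 < x ∧ 5000 < c + x) :
    l.foldl (fun (s : Int × Int) w => if s.2 + w ≤ 5000 then (s.1 + 1, s.2 + w) else s) (res, c)
        = (res, c)
    ∧ cntLE (psums l c) = 0 := by
  induction l generalizing c with
  | nil => simp [psums, cntLE]
  | cons w t ih =>
    have hw := h w (by simp)
    have hrej : ¬ (c + w ≤ 5000) := by omega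
    constructor
    · simp only [List.foldl, hrej, if_false]
      exact (ih c (fun y hy => h y (by simp [hy]))).1
    · simp only [psums, cntLE, hrej, if_false]
      have := (ih (c + w) (fun y hy => by
        have := h y (by simp [hy]); omega)).2
      omega

theorem greedy_eq_count (l : List Int) (hs : l.Pairwise (· ≤ ·)) :
    ∀ res c : Int, c ≤ 5000 →
      (l.foldl (fun (s : Int × Int) w => if s.2 + w ≤ 5000 then (s.1 + 1, s.2 + w) else s)
          (res, c)).1
        = res + cntLE (psums l c) := by
  induction l with
  | nil => intro res c _; simp [psums, cntLE]
  | cons w t ih =>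
    intro res c hc
    rcases List.pairwise_cons.mp hs with ⟨hw, ht⟩
    by_cases hacc : c + w ≤ 5000
    · simp only [List.foldl, psums, cntLE, hacc, if_true]
      rw [ih ht (res + 1) (c + w) hacc]
      ring
    · have hwpos : 0 < w := by omega
      have h1 := (reject t c res (fun y hy => ⟨by have := hw y hy; omega,
        by have := hw y hy; omega⟩)).1
      have h2 := (reject t (c + w) res (fun y hy => ⟨by have := hw y hy; omega,
        by have := hw y hy; omega⟩)).2
      simp only [List.foldl, psums, cntLE, hacc, if_false]
      rw [h1]
      omega

-- ===== VERDICT (by name: the statement is the Claim_ definition above) =====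
theorem maxNumberOfApples_spec : Claim_equal_maxNumberOfApples := by
  intro weight _
  unfold Spec_maxNumberOfApples maxNumberOfApples maxNumberOfApples_alt
  rw [buildB, countFold]
  have hp : (PySem.List.sorted weight (fun x => x) false).Pairwise (· ≤ ·) := by
    simpa using PySem.List.sorted_pairwise (xs := weight) (key := fun x => x)
  simpa using greedy_eq_count _ hp 0 0 (by norm_num)
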